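-- pv_equiv track=rewrite | github.com/2zm00/Algorithm | 1672 DNA 해독.py | decode_dna_optimized
-- ===== SOURCE A (Python) =====
-- decoding_table = {
--     'A': {'A': 'A', 'G': 'C', 'C': 'A', 'T': 'G'},
--     'G': {'A': 'C', 'G': 'G', 'C': 'T', 'T': 'A'},
--     'C': {'A': 'A', 'G': 'T', 'C': 'C', 'T': 'G'},
--     'T': {'A': 'G', 'G': 'A', 'C': 'G', 'T': 'T'}
-- }
--
-- def decode_dna_optimized(sequence):
--     stack = list(sequence)  # 문자열을 스택으로 변환
--     while len(stack) > 1: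
--         last = stack.pop()
--         second_last = stack.pop()
--         decoded = decoding_table[second_last][last]
--         stack.append(decoded)
--     return stack[0]
-- ===== SOURCE B (Python) =====
-- decoding_table = {
--     'A': {'A': 'A', 'G': 'C', 'C': 'A', 'T': 'G'},
--     'G': {'A': 'C', 'G': 'G', 'C': 'T', 'T': 'A'},
--     'C': {'A': 'A', 'G': 'T', 'C': 'C', 'T': 'G'},
--     'T': {'A': 'G', 'G': 'A', 'C': 'G', 'T': 'T'}
-- }
--
-- def decode_dna_optimized(sequence):
--     # Single left-to-right pass: compose the substitutions of all chars but the
--     # last into one map `perm` over the four bases, then apply it to the last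
--     # char (letters without a rule map to themselves).
--     perm = {'A': 'A', 'G': 'G', 'C': 'C', 'T': 'T'}
--     for ch in sequence[:-1]:
--         row = decoding_table[ch]
--         perm = {k: perm[row[k]] for k in 'AGCT'}
--     last = sequence[-1]
--     return perm.get(last, last)
-- ===== Notes on version B (the rewrite author's own statement) =====
-- stated objective: alternative
-- what changed: Replaces A's right-to-left stack loop (pop/pop/push on a shrinking list) by one left-to-right pass that composes the per-character substitutions of the four bases into a single map, applied once to the last character.
import Mathlib
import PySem

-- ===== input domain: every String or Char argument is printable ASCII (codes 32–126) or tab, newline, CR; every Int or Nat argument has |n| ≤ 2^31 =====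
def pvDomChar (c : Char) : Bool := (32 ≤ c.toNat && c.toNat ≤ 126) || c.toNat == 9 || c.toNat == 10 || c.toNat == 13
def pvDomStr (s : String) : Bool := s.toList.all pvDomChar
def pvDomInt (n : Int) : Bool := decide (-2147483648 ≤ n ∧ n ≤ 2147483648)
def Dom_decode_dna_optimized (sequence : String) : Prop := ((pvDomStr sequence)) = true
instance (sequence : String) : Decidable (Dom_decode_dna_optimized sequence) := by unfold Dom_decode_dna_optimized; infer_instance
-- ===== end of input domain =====

-- B replaces A's right-to-left pop/pop/push stack loop by one left-to-right pass composing the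
-- per-character substitutions of the four bases into a single map, applied once to the last char;
-- objective: alternative (same cost, no list mutation).

-- ===== PORT A =====
-- A's decoding_table as a function (keys outside 'A','G','C','T' raise KeyError in Python;
-- such inputs are outside Pre_, the port returns 'A' there).
def dtab (a b : Char) : Char :=
  match a, b with
  | 'A', 'A' => 'A' | 'A', 'G' => 'C' | 'A', 'C' => 'A' | 'A', 'T' => 'G'
  | 'G', 'A' => 'C' | 'G', 'G' => 'G' | 'G', 'C' => 'T' | 'G', 'T' => 'A'
  | 'C', 'A' => 'A' | 'C', 'G' => 'T' | 'C', 'C' => 'C' | 'C', 'T' => 'G'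
  | 'T', 'A' => 'G' | 'T', 'G' => 'A' | 'T', 'C' => 'G' | 'T', 'T' => 'T'
  | _, _ => 'A'

-- While len(stack) > 1: pop last, pop second_last, push decoded.  (pop = getLast + dropLast)
def decodeLoopA (stack : List Char) : List Char :=
  if _h : stack.length > 1 then
    let last := stack.getLast?.getD 'A'
    let stack1 := stack.dropLast
    let second_last := stack1.getLast?.getD 'A'
    let stack2 := stack1.dropLast
    decodeLoopA (stack2 ++ [dtab second_last last])
  else stack
termination_by stack.length
decreasing_by
  simp [List.length_dropLast]
  omega

def decode_dna_optimized (sequence : String) : String :=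
  let stack := sequence.toList
  String.mk [((decodeLoopA stack).headD 'A')]   -- stack[0]; IndexError on empty is outside Pre_

-- ===== PORT B =====
-- B's decoding_table, literally a dict of dicts.
def btable : PySem.Dict Char (PySem.Dict Char Char) :=
  PySem.Dict.mk
    [('A', PySem.Dict.mk [('A','A'),('G','C'),('C','A'),('T','G')]),
     ('G', PySem.Dict.mk [('A','C'),('G','G'),('C','T'),('T','A')]),
     ('C', PySem.Dict.mk [('A','A'),('G','T'),('C','C'),('T','G')]),
     ('T', PySem.Dict.mk [('A','G'),('G','A'),('C','G'),('T','T')])]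

-- one loop body: row = decoding_table[ch]; perm = {k: perm[row[k]] for k in 'AGCT'}
-- (the comprehension's keys 'A','G','C','T' are distinct, so the dict IS this items list;
--  the KeyError lookups decoding_table[ch] and perm[row[k]] are total here via getD — they
--  only default outside Pre_).
def bstep (perm : PySem.Dict Char Char) (ch : Char) : PySem.Dict Char Char :=
  let row := btable.getD ch (PySem.Dict.mk [])
  PySem.Dict.mk (['A','G','C','T'].map (fun k => (k, perm.getD (row.getD k 'A') 'A')))

def decode_dna_optimized_alt (sequence : String) : String :=
  let chars := sequence.toList
  let perm := chars.dropLast.foldl bstep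
    (PySem.Dict.mk [('A','A'),('G','G'),('C','C'),('T','T')])
  let last := chars.getLast?.getD 'A'    -- sequence[-1]; IndexError on empty is outside Pre_
  String.mk [perm.getD last last]        -- perm.get(last, last)

-- ===== PRECONDITION & SPEC =====
def pvIsBase (c : Char) : Bool := c == 'A' || c == 'G' || c == 'C' || c == 'T'

-- Exactly where A returns: nonempty, and (length 1, or every char is a table key).
def Pre_decode_dna_optimized (sequence : String) : Prop :=
  sequence.toList ≠ [] ∧
  (sequence.toList.length = 1 ∨ sequence.toList.all pvIsBase = true)
instance (sequence : String) : Decidable (Pre_decode_dna_optimized sequence) := by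
  unfold Pre_decode_dna_optimized; infer_instance

def pvWitness_decode_dna_optimized : String := "GATTACA"

def Spec_decode_dna_optimized (sequence : String) (out : String) : Prop := out = decode_dna_optimized_alt sequence
instance (sequence : String) (out : String) : Decidable (Spec_decode_dna_optimized sequence out) := by unfold Spec_decode_dna_optimized; infer_instance

-- ===== CLAIM (what is proved, stated in full; the proofs are below) =====
def Claim_equal_decode_dna_optimized : Prop := ∀ (sequence : String), Dom_decode_dna_optimized sequence → Pre_decode_dna_optimized sequence → Spec_decode_dna_optimized sequence (decode_dna_optimized sequence)

-- ===== LEMMAS AND PROOFS =====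

-- A's loop computes the right fold of dtab over the list (seed: last element).
theorem decodeLoopA_eq (n : ℕ) : ∀ (stack : List Char), stack.length = n → stack ≠ [] →
    decodeLoopA stack = [stack.dropLast.foldr dtab (stack.getLast?.getD 'A')] := by
  induction n using Nat.strong_induction_on with
  | _ n ih =>
    intro stack hlen hne
    by_cases hgt : stack.length > 1
    · obtain ⟨b, t, hrev⟩ : ∃ b t, stack.reverse = b :: t := by
        cases hr : stack.reverse with
        | nil => exact absurd (by simpa using congrArg List.reverse hr) hne
        | cons b t => exact ⟨b, t, rfl⟩
      obtain ⟨a, u, ht⟩ : ∃ a u, t = a :: u := by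
        cases t with
        | nil =>
          have : stack.length = 1 := by
            have := congrArg List.length hrev; simpa using this
          omega
        | cons a u => exact ⟨a, u, rfl⟩
      have hstack : stack = u.reverse ++ [a, b] := by
        have := congrArg List.reverse hrev
        simp [ht] at this
        simpa using this
      subst hstack
      rw [decodeLoopA]
      simp only [dif_pos hgt]
      have hrewrite : (u.reverse ++ [a, b]).getLast?.getD 'A' = b := by simp
      have hdrop : (u.reverse ++ [a, b]).dropLast = u.reverse ++ [a] := by
        simp [List.dropLast_append_of_ne_nil]
      rw [hrewrite, hdrop]
      have hdrop2 : (u.reverse ++ [a]).getLast?.getD 'A' = a := by simp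
      have hdrop3 : (u.reverse ++ [a]).dropLast = u.reverse := by
        simp [List.dropLast_append_of_ne_nil]
      rw [hdrop2, hdrop3]
      have hlt : (u.reverse ++ [dtab a b]).length < n := by
        simp at hlen ⊢
        omega
      rw [ih _ hlt _ rfl (by simp)]
      congr 1
      simp [List.dropLast_append_of_ne_nil, List.foldr_append]
    · rw [decodeLoopA]
      simp only [dif_neg hgt]
      cases stack with
      | nil => exact absurd rfl hne
      | cons x xs =>
        cases xs with
        | nil => simp
        | cons y ys => simp at hgt

-- the abstract shape of B's perm dict: keys 'A','G','C','T' with values given by g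
def dictOf (g : Char → Char) : PySem.Dict Char Char :=
  PySem.Dict.mk [('A', g 'A'), ('G', g 'G'), ('C', g 'C'), ('T', g 'T')]

theorem getD_dictOf_of_base (g : Char → Char) (c : Char) (d : Char) (hc : pvIsBase c = true) :
    (dictOf g).getD c d = g c := by
  simp only [pvIsBase, Bool.or_eq_true, beq_iff_eq] at hc
  rcases hc with ((h | h) | h) | h <;> subst h <;>
    simp [dictOf, PySem.Dict.getD_eq_get?_getD, PySem.Dict.get?_mk_cons]

theorem getD_dictOf_not_base (g : Char → Char) (c : Char) (hc : pvIsBase c = false) :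
    (dictOf g).getD c c = c := by
  simp only [pvIsBase, Bool.or_eq_false_iff, beq_eq_false_iff_ne, ne_eq] at hc
  obtain ⟨⟨⟨h1, h2⟩, h3⟩, h4⟩ := hc
  simp [dictOf, PySem.Dict.getD_eq_get?_getD, PySem.Dict.get?,
    Ne.symm h1, Ne.symm h2, Ne.symm h3, Ne.symm h4]

theorem bstep_dictOf (g : Char → Char) (ch : Char) (hch : pvIsBase ch = true) :
    bstep (dictOf g) ch = dictOf (fun k => g (dtab ch k)) := by
  simp only [pvIsBase, Bool.or_eq_true, beq_iff_eq] at hch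
  rcases hch with ((h | h) | h) | h <;> subst h <;>
    simp [bstep, btable, dictOf, dtab, List.map,
      PySem.Dict.getD_eq_get?_getD, PySem.Dict.get?_mk_cons]

theorem foldl_bstep_dictOf (xs : List Char) : ∀ (g : Char → Char),
    (∀ c ∈ xs, pvIsBase c = true) →
    xs.foldl bstep (dictOf g) = dictOf (fun k => g (xs.foldr dtab k)) := by
  induction xs with
  | nil => intro g _; rfl
  | cons x xs ih =>
    intro g hall
    have hx : pvIsBase x = true := hall x (by simp)
    calc (x :: xs).foldl bstep (dictOf g)
        = xs.foldl bstep (bstep (dictOf g) x) := rfl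
      _ = xs.foldl bstep (dictOf (fun k => g (dtab x k))) := by rw [bstep_dictOf g x hx]
      _ = dictOf (fun k => g (dtab x (xs.foldr dtab k))) :=
          ih (fun k => g (dtab x k)) (fun c hc => hall c (by simp [hc]))
      _ = dictOf (fun k => g ((x :: xs).foldr dtab k)) := rfl

theorem getLast_getD_mem (l : List Char) (hne : l ≠ []) : l.getLast?.getD 'A' ∈ l := by
  induction l with
  | nil => exact absurd rfl hne
  | cons x xs ih =>
    cases hx : xs with
    | nil => subst hx; simp
    | cons y ys =>
      subst hx
      rw [List.getLast?_cons_cons]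
      exact List.mem_cons_of_mem _ (ih (by simp))

-- ===== VERDICT (by name: the statement is the Claim_ definition above) =====
theorem decode_dna_optimized_spec : Claim_equal_decode_dna_optimized := by
  intro sequence _ hpre
  unfold Spec_decode_dna_optimized decode_dna_optimized decode_dna_optimized_alt
  dsimp only
  obtain ⟨hne, hcase⟩ := hpre
  have hinit : PySem.Dict.mk [('A','A'),('G','G'),('C','C'),('T','T')] = dictOf id := rfl
  rw [decodeLoopA_eq sequence.toList.length sequence.toList rfl hne]
  simp only [List.headD_cons, hinit]
  rcases hcase with h1 | hall
  · -- length 1: both sides are the single character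
    obtain ⟨c, hc⟩ : ∃ c, sequence.toList = [c] := by
      cases hl : sequence.toList with
      | nil => exact absurd hl hne
      | cons x xs =>
        cases xs with
        | nil => exact ⟨x, rfl⟩
        | cons y ys => rw [hl] at h1; simp at h1
    rw [hc]
    show String.mk [c] = String.mk [(dictOf id).getD c c]
    by_cases hb : pvIsBase c = true
    · rw [getD_dictOf_of_base id c c hb]; rfl
    · rw [getD_dictOf_not_base id c (by simpa using hb)]
  · -- all characters are table keys
    have hallmem : ∀ c ∈ sequence.toList, pvIsBase c = true := by
      intro c hc; exact List.all_eq_true.mp hall c hc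
    have hdrop : ∀ c ∈ sequence.toList.dropLast, pvIsBase c = true := by
      intro c hc
      have hsub := List.dropLast_sublist (l := sequence.toList)
      exact hallmem c (hsub.subset hc)
    rw [foldl_bstep_dictOf _ id hdrop]
    have hlast : pvIsBase (sequence.toList.getLast?.getD 'A') = true :=
      hallmem _ (getLast_getD_mem _ hne)
    rw [getD_dictOf_of_base _ _ _ hlast]; rfl
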